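-- pv_equiv track=rewrite | github.com/yuliaset/DeepRiichi | main.py | acceptance_of_tiles_global
-- ===== SOURCE A (Python) =====
-- def is_run(three_nums):
--     return (three_nums[1] == three_nums[0] + 1) and (three_nums[2] == three_nums[1] + 1)
--
-- def is_triplet2(three_nums):
--     return (three_nums[0] == three_nums[1]) and (three_nums[1] == three_nums[2])
--
-- def forms_meld(tiles_nums):
--     from itertools import combinations
--     if len(tiles_nums) < 3:
--         return False
--     for combo in combinations(tiles_nums, 3):
--         if is_run(sorted(combo)) or is_triplet2(combo):
--             return True
--     return False
--
-- def acceptance_of_tiles_global(shape, global_count):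
--     total = 0
--     for t in range(1, 10):
--         available = max(4 - global_count.get(t, 0), 0)
--         if available > 0:
--             if forms_meld(shape + [t]):
--                 total += available
--     return total
-- ===== SOURCE B (Python) =====
-- def acceptance_of_tiles_global(shape, global_count):
--     from collections import Counter
--     cnt = Counter(shape)
--     present = set(cnt)
--     total = 0
--     for t in range(1, 10):
--         available = max(4 - global_count.get(t, 0), 0)
--         if available > 0:
--             keys = present | {t}
--             has_triplet = any(cnt[v] + (v == t) >= 3 for v in keys)
--             has_run = any(v + 1 in keys and v + 2 in keys for v in keys)
--             if has_triplet or has_run: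
--                 total += available
--     return total
-- ===== Notes on version B (the rewrite author's own statement) =====
-- stated objective: faster
-- what changed: B replaces A's scan over all 3-combinations of the hand (with a sort of each combination) by a single Counter/set of tile values: a meld with drawn tile t exists iff some value occurs at least 3 times or three consecutive values are all present in shape+[t].
import Mathlib
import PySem

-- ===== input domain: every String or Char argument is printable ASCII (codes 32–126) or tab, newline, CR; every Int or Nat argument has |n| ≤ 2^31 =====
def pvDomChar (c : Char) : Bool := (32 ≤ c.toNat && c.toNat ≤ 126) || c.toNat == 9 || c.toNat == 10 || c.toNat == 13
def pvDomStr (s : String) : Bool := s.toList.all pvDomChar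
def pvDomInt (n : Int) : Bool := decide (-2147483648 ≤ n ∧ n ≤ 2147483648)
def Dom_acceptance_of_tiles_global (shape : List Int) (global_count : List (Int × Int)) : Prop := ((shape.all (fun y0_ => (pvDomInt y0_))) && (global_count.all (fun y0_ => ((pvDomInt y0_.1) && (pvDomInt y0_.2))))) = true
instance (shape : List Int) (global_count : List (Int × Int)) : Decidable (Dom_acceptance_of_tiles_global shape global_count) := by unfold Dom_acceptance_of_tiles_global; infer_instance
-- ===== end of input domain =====

-- B replaces A's O(n^3) scan over all 3-combinations by a tile-count table: a meld
-- with drawn tile t exists iff some value occurs ≥ 3 times or three consecutive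
-- values are present in shape+[t] (objective: faster, asymptotic).

-- ===== PORT A =====
-- itertools.combinations(l, 2) as lists
def pvPairs (l : List Int) : List (List Int) :=
  match l with
  | [] => []
  | x :: xs => xs.map (fun y => [x, y]) ++ pvPairs xs

-- itertools.combinations(l, 3) as lists
def pvCombos3 (l : List Int) : List (List Int) :=
  match l with
  | [] => []
  | x :: xs => (pvPairs xs).map (fun p => x :: p) ++ pvCombos3 xs

def pvIsRun (l : List Int) : Bool :=
  match l with
  | [a, b, c] => (b == a + 1) && (c == b + 1)
  | _ => false

def pvIsTriplet2 (l : List Int) : Bool :=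
  match l with
  | [a, b, c] => (a == b) && (b == c)
  | _ => false

def pvFormsMeld (l : List Int) : Bool :=
  if l.length < 3 then false
  else (pvCombos3 l).any (fun c =>
    pvIsRun (PySem.List.sorted c (fun x => x) false) || pvIsTriplet2 c)

def acceptance_of_tiles_global (shape : List Int) (global_count : List (Int × Int)) : Int :=
  (PySem.List.pyRange 1 10 1).foldl (fun total t =>
    let available := max (4 - (PySem.Dict.mk global_count).getD t 0) 0
    if available > 0 then
      if pvFormsMeld (shape ++ [t]) then total + available else total
    else total) 0

-- ===== PORT B =====
-- keys = present | {t}; any count ≥ 3, or any three consecutive values present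
def pvMeldCheck (cnt : PySem.Dict Int Int) (present : PySem.Set Int) (t : Int) : Bool :=
  let keys := PySem.Set.union present [t]
  let hasTriplet := keys.any (fun v => decide (3 ≤ cnt.getD v 0 + (if v == t then 1 else 0)))
  let hasRun := keys.any (fun v => PySem.Set.contains keys (v + 1) && PySem.Set.contains keys (v + 2))
  hasTriplet || hasRun

def acceptance_of_tiles_global_alt (shape : List Int) (global_count : List (Int × Int)) : Int :=
  let cnt := PySem.Dict.counter shape
  let present := PySem.Set.ofList cnt.keys
  (PySem.List.pyRange 1 10 1).foldl (fun total t =>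
    let available := max (4 - (PySem.Dict.mk global_count).getD t 0) 0
    if available > 0 then
      if pvMeldCheck cnt present t then total + available else total
    else total) 0

-- ===== PRECONDITION & SPEC =====
def Spec_acceptance_of_tiles_global (shape : List Int) (global_count : List (Int × Int)) (out : Int) : Prop := out = acceptance_of_tiles_global_alt shape global_count
instance (shape : List Int) (global_count : List (Int × Int)) (out : Int) : Decidable (Spec_acceptance_of_tiles_global shape global_count out) := by unfold Spec_acceptance_of_tiles_global; infer_instance

-- ===== CLAIM (what is proved, stated in full; the proofs are below) =====
def Claim_equal_acceptance_of_tiles_global : Prop := ∀ (shape : List Int) (global_count : List (Int × Int)), Dom_acceptance_of_tiles_global shape global_count → Spec_acceptance_of_tiles_global shape global_count (acceptance_of_tiles_global shape global_count)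

-- ===== LEMMAS AND PROOFS =====

-- the semantic content both checks compute
def MeldProp (l : List Int) : Prop :=
  (∃ v, 3 ≤ l.count v) ∨ (∃ v, v ∈ l ∧ v + 1 ∈ l ∧ v + 2 ∈ l)

theorem mem_pvPairs (c l : List Int) : c ∈ pvPairs l ↔ c.Sublist l ∧ c.length = 2 := by
  induction l generalizing c with
  | nil =>
    simp only [pvPairs, List.not_mem_nil, false_iff]
    rintro ⟨h, hl⟩
    simp [List.sublist_nil.mp h] at hl
  | cons x xs ih =>
    simp only [pvPairs, List.mem_append, List.mem_map, ih]
    constructor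
    · rintro (⟨y, hy, rfl⟩ | ⟨hs, hl⟩)
      · exact ⟨(List.singleton_sublist.mpr hy).cons₂ x, rfl⟩
      · exact ⟨hs.cons x, hl⟩
    · rintro ⟨hs, hl⟩
      rcases List.sublist_cons_iff.mp hs with h | ⟨r, rfl, hr⟩
      · exact Or.inr ⟨h, hl⟩
      · obtain ⟨y, rfl⟩ := List.length_eq_one_iff.mp (by simpa using hl)
        exact Or.inl ⟨y, List.singleton_sublist.mp hr, rfl⟩

theorem mem_pvCombos3 (c l : List Int) : c ∈ pvCombos3 l ↔ c.Sublist l ∧ c.length = 3 := by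
  induction l generalizing c with
  | nil =>
    simp only [pvCombos3, List.not_mem_nil, false_iff]
    rintro ⟨h, hl⟩
    simp [List.sublist_nil.mp h] at hl
  | cons x xs ih =>
    simp only [pvCombos3, List.mem_append, List.mem_map, ih, mem_pvPairs]
    constructor
    · rintro (⟨p, ⟨hs, hl⟩, rfl⟩ | ⟨hs, hl⟩)
      · exact ⟨hs.cons₂ x, by simp [hl]⟩
      · exact ⟨hs.cons x, hl⟩
    · rintro ⟨hs, hl⟩
      rcases List.sublist_cons_iff.mp hs with h | ⟨r, rfl, hr⟩
      · exact Or.inr ⟨h, hl⟩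
      · exact Or.inl ⟨r, ⟨hr, by simpa using hl⟩, rfl⟩

theorem formsMeld_iff (l : List Int) : pvFormsMeld l = true ↔ MeldProp l := by
  constructor
  · intro h
    unfold pvFormsMeld at h
    split at h
    · exact absurd h (by simp)
    · obtain ⟨c, hc, hcond⟩ := List.any_eq_true.mp h
      obtain ⟨hsub, hlen⟩ := (mem_pvCombos3 c l).mp hc
      have hcond' : pvIsRun (PySem.List.sorted c (fun x => x) false) = true ∨ pvIsTriplet2 c = true := by
        simpa using hcond
      rcases hcond' with hrun | htrip
      · -- run case
        have hperm : (PySem.List.sorted c (fun x => x) false).Perm c := PySem.List.sorted_perm ..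
        have hlen3 : (PySem.List.sorted c (fun x => x) false).length = 3 := by
          simpa [PySem.List.length_sorted] using hlen
        obtain ⟨a, b, d, hsm⟩ := List.length_eq_three.mp hlen3
        rw [hsm] at hperm hrun
        unfold pvIsRun at hrun
        simp only [Bool.and_eq_true, beq_iff_eq] at hrun
        have hmem : ∀ x ∈ ([a, b, d] : List Int), x ∈ l := fun x hx => hsub.subset (hperm.mem_iff.mp hx)
        refine Or.inr ⟨a, hmem a (by simp), ?_, ?_⟩
        · rw [← hrun.1]; exact hmem b (by simp)
        · rw [show a + 2 = d by omega]; exact hmem d (by simp)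
      · -- triplet case
        obtain ⟨a, b, d, rfl⟩ := List.length_eq_three.mp hlen
        unfold pvIsTriplet2 at htrip
        simp only [Bool.and_eq_true, beq_iff_eq] at htrip
        obtain ⟨rfl, rfl⟩ := htrip
        refine Or.inl ⟨a, ?_⟩
        have := hsub.count_le a
        simpa using this
  · intro h
    have key : ∃ c, c ∈ pvCombos3 l ∧
        (pvIsRun (PySem.List.sorted c (fun x => x) false) || pvIsTriplet2 c) = true := by
      rcases h with ⟨v, hv⟩ | ⟨v, h0, h1, h2⟩
      · -- a triple of equal tiles
        have hsp : List.Subperm [v, v, v] l := by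
          rw [List.subperm_ext_iff]
          intro x hx
          simp only [List.mem_cons, List.not_mem_nil, or_false] at hx
          rcases hx with rfl | rfl | rfl <;> simpa using hv
        obtain ⟨c, hperm, hsub⟩ := hsp
        have hc : c = List.replicate 3 v := List.perm_replicate.mp hperm
        rw [show List.replicate 3 v = [v, v, v] from rfl] at hc
        subst hc
        refine ⟨[v, v, v], (mem_pvCombos3 _ _).mpr ⟨hsub, rfl⟩, ?_⟩
        simp [pvIsTriplet2]
      · -- three consecutive tiles
        have hsp : List.Subperm [v, v + 1, v + 2] l := by
          rw [List.subperm_ext_iff]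
          intro x hx
          simp only [List.mem_cons, List.not_mem_nil, or_false] at hx
          have hcount : ∀ y ∈ l, (1 : Nat) ≤ l.count y := fun y hy => List.count_pos_iff.mpr hy
          rcases hx with hxe | hxe | hxe <;> rw [hxe]
          · simpa [List.count_cons, show ¬ (v = v + 1) by omega, show ¬ (v = v + 2) by omega]
              using hcount v h0
          · simpa [List.count_cons, show ¬ (v + 1 = v) by omega, show ¬ (v + 1 = v + 2) by omega]
              using hcount (v + 1) h1
          · simpa [List.count_cons, show ¬ (v + 2 = v) by omega, show ¬ (v + 2 = v + 1) by omega]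
              using hcount (v + 2) h2
        obtain ⟨c, hperm, hsub⟩ := hsp
        refine ⟨c, (mem_pvCombos3 _ _).mpr ⟨hsub, by simpa using hperm.length_eq⟩, ?_⟩
        have hsorted : PySem.List.sorted c (fun x => x) false = [v, v + 1, v + 2] := by
          apply PySem.List.sorted_eq_of_perm_of_pairwise_lt
          · exact hperm.symm
          · simp only [List.pairwise_cons, List.mem_cons, List.not_mem_nil, or_false,
              forall_eq_or_imp, forall_eq]
            exact ⟨⟨by omega, by omega⟩, by omega, fun _ h => h.elim, List.Pairwise.nil⟩
        rw [hsorted]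
        have hr : pvIsRun [v, v + 1, v + 2] = true := by
          have h21 : v + 2 = v + 1 + 1 := by omega
          simp [pvIsRun, h21]
        simp [hr]
    obtain ⟨c, hc, hcond⟩ := key
    have hlen : 3 ≤ l.length := by
      obtain ⟨hsub, hl3⟩ := (mem_pvCombos3 c l).mp hc
      have := hsub.length_le
      omega
    unfold pvFormsMeld
    rw [if_neg (by omega)]
    exact List.any_eq_true.mpr ⟨c, hc, hcond⟩

theorem count_append_singleton (l : List Int) (v t : Int) :
    (l ++ [t]).count v = l.count v + (if v = t then 1 else 0) := by
  by_cases hvt : v = t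
  · subst hvt; simp [List.count_append]
  · have h2 : ¬ t = v := fun h => hvt h.symm
    simp [List.count_append, hvt, h2]

theorem meldCheck_iff (shape : List Int) (t : Int) :
    pvMeldCheck (PySem.Dict.counter shape) (PySem.Set.ofList (PySem.Dict.counter shape).keys) t = true
      ↔ MeldProp (shape ++ [t]) := by
  unfold pvMeldCheck
  have hmemkeys : ∀ v : Int,
      v ∈ PySem.Set.union (PySem.Set.ofList (PySem.Dict.counter shape).keys) [t]
        ↔ v ∈ shape ++ [t] := by
    intro v
    simp [PySem.Set.mem_union, PySem.Set.mem_ofList, PySem.Dict.keys_counter]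
  simp only [Bool.or_eq_true, List.any_eq_true, Bool.and_eq_true, decide_eq_true_eq,
    PySem.Set.contains_iff]
  unfold MeldProp
  constructor
  · rintro (⟨v, hvk, hv⟩ | ⟨v, hvk, h1, h2⟩)
    · refine Or.inl ⟨v, ?_⟩
      rw [PySem.Dict.getD_counter] at hv
      rw [count_append_singleton]
      by_cases hvt : v = t
      · rw [if_pos hvt]
        rw [if_pos (by simpa using hvt)] at hv
        omega
      · rw [if_neg hvt]
        rw [if_neg (by simpa using hvt)] at hv
        omega
    · exact Or.inr ⟨v, (hmemkeys v).mp hvk, (hmemkeys _).mp h1, (hmemkeys _).mp h2⟩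
  · rintro (⟨v, hv⟩ | ⟨v, h0, h1, h2⟩)
    · rw [count_append_singleton] at hv
      refine Or.inl ⟨v, ?_, ?_⟩
      · rw [hmemkeys v, List.mem_append]
        by_cases hvt : v = t
        · exact Or.inr (by simp [hvt])
        · rw [if_neg hvt] at hv
          exact Or.inl (List.count_pos_iff.mp (by omega))
      · rw [PySem.Dict.getD_counter]
        by_cases hvt : v = t
        · rw [if_pos hvt] at hv
          rw [if_pos (by simpa using hvt)]
          omega
        · rw [if_neg hvt] at hv
          rw [if_neg (by simpa using hvt)]
          omega
    · exact Or.inr ⟨v, (hmemkeys v).mpr h0, (hmemkeys _).mpr h1, (hmemkeys _).mpr h2⟩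

theorem meld_eq (shape : List Int) (t : Int) :
    pvFormsMeld (shape ++ [t])
      = pvMeldCheck (PySem.Dict.counter shape) (PySem.Set.ofList (PySem.Dict.counter shape).keys) t := by
  rw [Bool.eq_iff_iff, formsMeld_iff, meldCheck_iff]

-- ===== VERDICT (by name: the statement is the Claim_ definition above) =====
theorem acceptance_of_tiles_global_spec : Claim_equal_acceptance_of_tiles_global := by
  intro shape global_count _
  unfold Spec_acceptance_of_tiles_global acceptance_of_tiles_global acceptance_of_tiles_global_alt
  congr 1
  funext total t
  rw [meld_eq]
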